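-- pv_equiv track=rewrite | github.com/pramitd1/options_quant_engine | app/terminal_output.py | _summarize_confidence_guards
-- ===== SOURCE A (Python) =====
-- def _summarize_confidence_guards(guards):
--     """Return a compact explanation when display confidence is being capped."""
--     if not isinstance(guards, list) or not guards:
--         return None
--
--     normalized = {str(item).strip().lower() for item in guards if str(item).strip()}
--     notes = []
--
--     if "provider_health_weak" in normalized:
--         notes.append("capped by weak provider health")
--     elif "provider_health_caution" in normalized:
--         notes.append("capped by caution provider health")
--
--     if "status_watchlist_or_blocked" in normalized:
--         notes.append("capped by blocked/watchlist status")
--     if "data_quality_weak" in normalized: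
--         notes.append("capped by weak data quality")
--     elif "data_quality_caution" in normalized:
--         notes.append("capped by caution data quality")
--     if "explicit_no_trade_reason" in normalized:
--         notes.append("capped by explicit no-trade reason")
--     if "direction_unresolved" in normalized:
--         notes.append("capped by unresolved direction")
--     if "confirmation_conflict_or_no_direction" in normalized:
--         notes.append("capped by confirmation conflict")
--
--     if not notes:
--         return None
--
--     deduped_notes = []
--     seen = set()
--     for note in notes:
--         if note in seen:
--             continue
--         seen.add(note)
--         deduped_notes.append(note)
--     return "; ".join(deduped_notes)
-- ===== SOURCE B (Python) =====
-- # Single left-to-right pass over the guards themselves: each normalized guard is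
-- # dispatched through a flag -> (slot, rank, note) table into one of six fixed
-- # output slots, keeping the lowest-rank note per slot (weak beats caution).
-- # No set is built and no dedup pass is needed.
-- _FLAG_INFO = {
--     "provider_health_weak": (0, 0, "capped by weak provider health"),
--     "provider_health_caution": (0, 1, "capped by caution provider health"),
--     "status_watchlist_or_blocked": (1, 0, "capped by blocked/watchlist status"),
--     "data_quality_weak": (2, 0, "capped by weak data quality"),
--     "data_quality_caution": (2, 1, "capped by caution data quality"),
--     "explicit_no_trade_reason": (3, 0, "capped by explicit no-trade reason"),
--     "direction_unresolved": (4, 0, "capped by unresolved direction"),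
--     "confirmation_conflict_or_no_direction": (5, 0, "capped by confirmation conflict"),
-- }
--
--
-- def _summarize_confidence_guards(guards):
--     """Return a compact explanation when display confidence is being capped."""
--     if not isinstance(guards, list) or not guards:
--         return None
--     slots = [None] * 6
--     for item in guards:
--         info = _FLAG_INFO.get(str(item).strip().lower())
--         if info is None:
--             continue
--         slot, rank, note = info
--         if slots[slot] is None or rank < slots[slot][0]:
--             slots[slot] = (rank, note)
--     notes = [entry[1] for entry in slots if entry is not None]
--     return "; ".join(notes) if notes else None
-- ===== Notes on version B (the rewrite author's own statement) =====
-- stated objective: alternative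
-- what changed: Instead of building a normalized set and probing it with a hard-coded if/elif chain plus a dedup pass, B makes a single pass over the guards themselves, dispatching each normalized guard through a flag->(slot,rank,note) table into six fixed output slots and keeping the lowest-rank note per slot (weak outranks caution), then joins the non-empty slots in order.
import Mathlib
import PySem

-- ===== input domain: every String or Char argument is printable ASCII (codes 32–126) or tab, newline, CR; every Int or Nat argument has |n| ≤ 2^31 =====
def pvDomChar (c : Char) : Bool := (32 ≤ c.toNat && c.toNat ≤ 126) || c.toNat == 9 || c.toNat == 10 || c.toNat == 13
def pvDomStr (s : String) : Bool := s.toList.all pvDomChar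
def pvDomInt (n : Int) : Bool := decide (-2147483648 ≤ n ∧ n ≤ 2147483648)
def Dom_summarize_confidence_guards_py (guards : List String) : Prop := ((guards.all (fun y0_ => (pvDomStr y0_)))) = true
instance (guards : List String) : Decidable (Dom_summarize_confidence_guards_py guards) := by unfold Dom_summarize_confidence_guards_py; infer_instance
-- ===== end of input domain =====

-- B replaces A's normalized-set + if/elif chain + dedup pass by a single pass over the
-- guards, dispatching each normalized guard via a flag->(slot,rank,note) table into six
-- fixed slots, keeping the lowest rank per slot (alternative decomposition, same cost).

-- ===== PORT A =====
def summarize_confidence_guards_py (guards : List String) : Option String :=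
  if guards = [] then none
  else
    let normalized : PySem.Set String :=
      PySem.Set.ofList ((guards.filter
          (fun item => !(PySem.Str.strip item == ""))).map
        (fun item => PySem.Str.lower (PySem.Str.strip item)))
    let notes : List String := []
    let notes := if normalized.contains "provider_health_weak" then
        notes ++ ["capped by weak provider health"]
      else if normalized.contains "provider_health_caution" then
        notes ++ ["capped by caution provider health"]
      else notes
    let notes := if normalized.contains "status_watchlist_or_blocked" then
        notes ++ ["capped by blocked/watchlist status"] else notes
    let notes := if normalized.contains "data_quality_weak" then
        notes ++ ["capped by weak data quality"]
      else if normalized.contains "data_quality_caution" then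
        notes ++ ["capped by caution data quality"]
      else notes
    let notes := if normalized.contains "explicit_no_trade_reason" then
        notes ++ ["capped by explicit no-trade reason"] else notes
    let notes := if normalized.contains "direction_unresolved" then
        notes ++ ["capped by unresolved direction"] else notes
    let notes := if normalized.contains "confirmation_conflict_or_no_direction" then
        notes ++ ["capped by confirmation conflict"] else notes
    if notes = [] then none
    else
      let st := notes.foldl
        (fun (acc : List String × PySem.Set String) note =>
          if acc.2.contains note then acc
          else (acc.1 ++ [note], PySem.Set.add acc.2 note))
        ([], PySem.Set.empty)
      some (PySem.Str.join "; " st.1)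

-- ===== PORT B =====
-- the normalization str(item).strip().lower() both Source B and Source A apply to each guard
def pvKey (g : String) : String := PySem.Str.lower (PySem.Str.strip g)

structure PvSlots where
  s0 : Option (Int × String)
  s1 : Option (Int × String)
  s2 : Option (Int × String)
  s3 : Option (Int × String)
  s4 : Option (Int × String)
  s5 : Option (Int × String)
deriving DecidableEq, Repr

def pvFlagInfo : PySem.Dict String (Int × Int × String) := PySem.Dict.mk
  [("provider_health_weak", (0, 0, "capped by weak provider health")),
   ("provider_health_caution", (0, 1, "capped by caution provider health")),
   ("status_watchlist_or_blocked", (1, 0, "capped by blocked/watchlist status")),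
   ("data_quality_weak", (2, 0, "capped by weak data quality")),
   ("data_quality_caution", (2, 1, "capped by caution data quality")),
   ("explicit_no_trade_reason", (3, 0, "capped by explicit no-trade reason")),
   ("direction_unresolved", (4, 0, "capped by unresolved direction")),
   ("confirmation_conflict_or_no_direction", (5, 0, "capped by confirmation conflict"))]

def pvUpd (cur : Option (Int × String)) (rank : Int) (note : String) : Option (Int × String) :=
  match cur with
  | none => some (rank, note)
  | some (r, n) => if rank < r then some (rank, note) else some (r, n)

def pvStep (acc : PvSlots) (item : String) : PvSlots :=
  match pvFlagInfo.get? (pvKey item) with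
  | none => acc
  | some (slot, rank, note) =>
      if slot == 0 then { acc with s0 := pvUpd acc.s0 rank note }
      else if slot == 1 then { acc with s1 := pvUpd acc.s1 rank note }
      else if slot == 2 then { acc with s2 := pvUpd acc.s2 rank note }
      else if slot == 3 then { acc with s3 := pvUpd acc.s3 rank note }
      else if slot == 4 then { acc with s4 := pvUpd acc.s4 rank note }
      else { acc with s5 := pvUpd acc.s5 rank note }


def summarize_confidence_guards_py_alt (guards : List String) : Option String :=
  if guards = [] then none
  else
    let final := guards.foldl pvStep ⟨none, none, none, none, none, none⟩
    let notes := ([final.s0, final.s1, final.s2, final.s3, final.s4, final.s5]).filterMap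
      (fun e => e.map (·.2))
    if notes = [] then none else some (PySem.Str.join "; " notes)

-- ===== PRECONDITION & SPEC =====
def Spec_summarize_confidence_guards_py (guards : List String) (out : Option String) : Prop := out = summarize_confidence_guards_py_alt guards
instance (guards : List String) (out : Option String) : Decidable (Spec_summarize_confidence_guards_py guards out) := by unfold Spec_summarize_confidence_guards_py; infer_instance

-- ===== CLAIM (what is proved, stated in full; the proofs are below) =====
def Claim_equal_summarize_confidence_guards_py : Prop := ∀ (guards : List String), Dom_summarize_confidence_guards_py guards → Spec_summarize_confidence_guards_py guards (summarize_confidence_guards_py guards)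

-- ===== LEMMAS AND PROOFS =====

lemma pvKey_of_strip_empty (g : String) (h : PySem.Str.strip g = "") : pvKey g = "" := by
  simp [pvKey, h]; decide

-- A's membership test on the normalized set, as a scan of the raw guards
lemma pvContainsA (guards : List String) (flag : String) (hf : flag ≠ "") :
    (PySem.Set.ofList ((guards.filter
        (fun item => !(PySem.Str.strip item == ""))).map
      (fun item => PySem.Str.lower (PySem.Str.strip item)))).contains flag
    = guards.any (fun g => flag == pvKey g) := by
  rw [Bool.eq_iff_iff]
  simp only [PySem.Set.contains_iff, PySem.Set.mem_ofList, List.mem_map, List.mem_filter,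
    List.any_eq_true, beq_iff_eq, Bool.not_eq_eq_eq_not, Bool.not_true, beq_eq_false_iff_ne]
  constructor
  · rintro ⟨g, ⟨hg, _⟩, rfl⟩; exact ⟨g, hg, rfl⟩
  · rintro ⟨g, hg, rfl⟩
    refine ⟨g, ⟨hg, ?_⟩, rfl⟩
    intro hstrip
    exact hf (pvKey_of_strip_empty g hstrip)

set_option maxHeartbeats 1000000 in
lemma pvStep_cases (acc : PvSlots) (g : String) :
    pvStep acc g =
      if "provider_health_weak" == pvKey g then { acc with s0 := pvUpd acc.s0 0 "capped by weak provider health" }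
      else if "provider_health_caution" == pvKey g then { acc with s0 := pvUpd acc.s0 1 "capped by caution provider health" }
      else if "status_watchlist_or_blocked" == pvKey g then { acc with s1 := pvUpd acc.s1 0 "capped by blocked/watchlist status" }
      else if "data_quality_weak" == pvKey g then { acc with s2 := pvUpd acc.s2 0 "capped by weak data quality" }
      else if "data_quality_caution" == pvKey g then { acc with s2 := pvUpd acc.s2 1 "capped by caution data quality" }
      else if "explicit_no_trade_reason" == pvKey g then { acc with s3 := pvUpd acc.s3 0 "capped by explicit no-trade reason" }
      else if "direction_unresolved" == pvKey g then { acc with s4 := pvUpd acc.s4 0 "capped by unresolved direction" }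
      else if "confirmation_conflict_or_no_direction" == pvKey g then { acc with s5 := pvUpd acc.s5 0 "capped by confirmation conflict" }
      else acc := by
  unfold pvStep
  simp only [pvFlagInfo, PySem.Dict.get?_mk_cons]
  by_cases h1 : ("provider_health_weak" : String) = pvKey g
  · simp [← h1]
  by_cases h2 : ("provider_health_caution" : String) = pvKey g
  · simp [← h2]
  by_cases h3 : ("status_watchlist_or_blocked" : String) = pvKey g
  · simp [← h3]
  by_cases h4 : ("data_quality_weak" : String) = pvKey g
  · simp [← h4]
  by_cases h5 : ("data_quality_caution" : String) = pvKey g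
  · simp [← h5]
  by_cases h6 : ("explicit_no_trade_reason" : String) = pvKey g
  · simp [← h6]
  by_cases h7 : ("direction_unresolved" : String) = pvKey g
  · simp [← h7]
  by_cases h8 : ("confirmation_conflict_or_no_direction" : String) = pvKey g
  · simp [← h8]
  simp [h1, h2, h3, h4, h5, h6, h7, h8,
    show (PySem.Dict.mk ([] : List (String × Int × Int × String))).get? (pvKey g) = none from rfl]

lemma pvFold_s0 (gs : List String) : ∀ acc : PvSlots,
    (gs.foldl pvStep acc).s0 = gs.foldl
      (fun cur g => if "provider_health_weak" == pvKey g then pvUpd cur 0 "capped by weak provider health"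
        else if "provider_health_caution" == pvKey g then pvUpd cur 1 "capped by caution provider health"
        else cur) acc.s0 := by
  induction gs with
  | nil => intro acc; rfl
  | cons g gs ih =>
    intro acc
    rw [List.foldl_cons, List.foldl_cons, pvStep_cases]
    split_ifs <;> simp [ih]

lemma pvScalarPair (fw fc nw nc : String) (gs : List String) :
    ∀ cur : Option (Int × String), (cur = none ∨ cur = some (0, nw) ∨ cur = some (1, nc)) →
    gs.foldl (fun cur g => if fw == pvKey g then pvUpd cur 0 nw
        else if fc == pvKey g then pvUpd cur 1 nc else cur) cur
    = if gs.any (fun g => fw == pvKey g) then some (0, nw)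
      else if gs.any (fun g => fc == pvKey g) then
        (if cur = some (0, nw) then some (0, nw) else some (1, nc))
      else cur := by
  induction gs with
  | nil => rintro cur (rfl | rfl | rfl) <;> simp
  | cons g gs ih =>
    rintro cur hcur
    rw [List.foldl_cons]
    by_cases h1 : fw == pvKey g
    · have hstep : (if fw == pvKey g then pvUpd cur 0 nw
          else if fc == pvKey g then pvUpd cur 1 nc else cur) = some (0, nw) := by
        rcases hcur with rfl | rfl | rfl <;> simp [h1, pvUpd]
      rw [hstep, ih _ (Or.inr (Or.inl rfl))]
      simp [h1]
    · by_cases h2 : fc == pvKey g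
      · have hstep : (if fw == pvKey g then pvUpd cur 0 nw
            else if fc == pvKey g then pvUpd cur 1 nc else cur)
            = (if cur = some (0, nw) then some (0, nw) else some (1, nc)) := by
          rcases hcur with rfl | rfl | rfl <;> simp [h1, h2, pvUpd]
        rw [hstep]
        by_cases hc : cur = some (0, nw)
        · rw [if_pos hc, ih _ (Or.inr (Or.inl rfl))]
          simp [h1, h2]
        · rw [if_neg hc, ih _ (Or.inr (Or.inr rfl))]
          simp [h1, h2]
      · rw [if_neg (by simp_all), if_neg (by simp_all), ih _ hcur]
        simp [h1, h2]

lemma pvFold_s1 (gs : List String) : ∀ acc : PvSlots,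
    (gs.foldl pvStep acc).s1 = gs.foldl
      (fun cur g => if "status_watchlist_or_blocked" == pvKey g then pvUpd cur 0 "capped by blocked/watchlist status" else cur) acc.s1 := by
  induction gs with
  | nil => intro acc; rfl
  | cons g gs ih =>
    intro acc
    rw [List.foldl_cons, List.foldl_cons, pvStep_cases]
    by_cases h1 : ("provider_health_weak" : String) = pvKey g
    · simp [← h1, ih]
    by_cases h2 : ("provider_health_caution" : String) = pvKey g
    · simp [← h2, ih]
    by_cases h3 : ("status_watchlist_or_blocked" : String) = pvKey g
    · simp [← h3, ih]
    by_cases h4 : ("data_quality_weak" : String) = pvKey g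
    · simp [← h4, ih]
    by_cases h5 : ("data_quality_caution" : String) = pvKey g
    · simp [← h5, ih]
    by_cases h6 : ("explicit_no_trade_reason" : String) = pvKey g
    · simp [← h6, ih]
    by_cases h7 : ("direction_unresolved" : String) = pvKey g
    · simp [← h7, ih]
    by_cases h8 : ("confirmation_conflict_or_no_direction" : String) = pvKey g
    · simp [← h8, ih]
    simp [h1, h2, h3, h4, h5, h6, h7, h8, ih]

lemma pvFold_s2 (gs : List String) : ∀ acc : PvSlots,
    (gs.foldl pvStep acc).s2 = gs.foldl
      (fun cur g => if "data_quality_weak" == pvKey g then pvUpd cur 0 "capped by weak data quality"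
        else if "data_quality_caution" == pvKey g then pvUpd cur 1 "capped by caution data quality"
        else cur) acc.s2 := by
  induction gs with
  | nil => intro acc; rfl
  | cons g gs ih =>
    intro acc
    rw [List.foldl_cons, List.foldl_cons, pvStep_cases]
    by_cases h1 : ("provider_health_weak" : String) = pvKey g
    · simp [← h1, ih]
    by_cases h2 : ("provider_health_caution" : String) = pvKey g
    · simp [← h2, ih]
    by_cases h3 : ("status_watchlist_or_blocked" : String) = pvKey g
    · simp [← h3, ih]
    by_cases h4 : ("data_quality_weak" : String) = pvKey g
    · simp [← h4, ih]
    by_cases h5 : ("data_quality_caution" : String) = pvKey g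
    · simp [← h5, ih]
    by_cases h6 : ("explicit_no_trade_reason" : String) = pvKey g
    · simp [← h6, ih]
    by_cases h7 : ("direction_unresolved" : String) = pvKey g
    · simp [← h7, ih]
    by_cases h8 : ("confirmation_conflict_or_no_direction" : String) = pvKey g
    · simp [← h8, ih]
    simp [h1, h2, h3, h4, h5, h6, h7, h8, ih]

lemma pvFold_s3 (gs : List String) : ∀ acc : PvSlots,
    (gs.foldl pvStep acc).s3 = gs.foldl
      (fun cur g => if "explicit_no_trade_reason" == pvKey g then pvUpd cur 0 "capped by explicit no-trade reason" else cur) acc.s3 := by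
  induction gs with
  | nil => intro acc; rfl
  | cons g gs ih =>
    intro acc
    rw [List.foldl_cons, List.foldl_cons, pvStep_cases]
    by_cases h1 : ("provider_health_weak" : String) = pvKey g
    · simp [← h1, ih]
    by_cases h2 : ("provider_health_caution" : String) = pvKey g
    · simp [← h2, ih]
    by_cases h3 : ("status_watchlist_or_blocked" : String) = pvKey g
    · simp [← h3, ih]
    by_cases h4 : ("data_quality_weak" : String) = pvKey g
    · simp [← h4, ih]
    by_cases h5 : ("data_quality_caution" : String) = pvKey g
    · simp [← h5, ih]
    by_cases h6 : ("explicit_no_trade_reason" : String) = pvKey g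
    · simp [← h6, ih]
    by_cases h7 : ("direction_unresolved" : String) = pvKey g
    · simp [← h7, ih]
    by_cases h8 : ("confirmation_conflict_or_no_direction" : String) = pvKey g
    · simp [← h8, ih]
    simp [h1, h2, h3, h4, h5, h6, h7, h8, ih]

lemma pvFold_s4 (gs : List String) : ∀ acc : PvSlots,
    (gs.foldl pvStep acc).s4 = gs.foldl
      (fun cur g => if "direction_unresolved" == pvKey g then pvUpd cur 0 "capped by unresolved direction" else cur) acc.s4 := by
  induction gs with
  | nil => intro acc; rfl
  | cons g gs ih =>
    intro acc
    rw [List.foldl_cons, List.foldl_cons, pvStep_cases]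
    by_cases h1 : ("provider_health_weak" : String) = pvKey g
    · simp [← h1, ih]
    by_cases h2 : ("provider_health_caution" : String) = pvKey g
    · simp [← h2, ih]
    by_cases h3 : ("status_watchlist_or_blocked" : String) = pvKey g
    · simp [← h3, ih]
    by_cases h4 : ("data_quality_weak" : String) = pvKey g
    · simp [← h4, ih]
    by_cases h5 : ("data_quality_caution" : String) = pvKey g
    · simp [← h5, ih]
    by_cases h6 : ("explicit_no_trade_reason" : String) = pvKey g
    · simp [← h6, ih]
    by_cases h7 : ("direction_unresolved" : String) = pvKey g
    · simp [← h7, ih]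
    by_cases h8 : ("confirmation_conflict_or_no_direction" : String) = pvKey g
    · simp [← h8, ih]
    simp [h1, h2, h3, h4, h5, h6, h7, h8, ih]

lemma pvFold_s5 (gs : List String) : ∀ acc : PvSlots,
    (gs.foldl pvStep acc).s5 = gs.foldl
      (fun cur g => if "confirmation_conflict_or_no_direction" == pvKey g then pvUpd cur 0 "capped by confirmation conflict" else cur) acc.s5 := by
  induction gs with
  | nil => intro acc; rfl
  | cons g gs ih =>
    intro acc
    rw [List.foldl_cons, List.foldl_cons, pvStep_cases]
    by_cases h1 : ("provider_health_weak" : String) = pvKey g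
    · simp [← h1, ih]
    by_cases h2 : ("provider_health_caution" : String) = pvKey g
    · simp [← h2, ih]
    by_cases h3 : ("status_watchlist_or_blocked" : String) = pvKey g
    · simp [← h3, ih]
    by_cases h4 : ("data_quality_weak" : String) = pvKey g
    · simp [← h4, ih]
    by_cases h5 : ("data_quality_caution" : String) = pvKey g
    · simp [← h5, ih]
    by_cases h6 : ("explicit_no_trade_reason" : String) = pvKey g
    · simp [← h6, ih]
    by_cases h7 : ("direction_unresolved" : String) = pvKey g
    · simp [← h7, ih]
    by_cases h8 : ("confirmation_conflict_or_no_direction" : String) = pvKey g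
    · simp [← h8, ih]
    simp [h1, h2, h3, h4, h5, h6, h7, h8, ih]

lemma pvScalarSingle (flag note : String) (gs : List String) :
    ∀ cur : Option (Int × String), (cur = none ∨ cur = some (0, note)) →
    gs.foldl (fun cur g => if flag == pvKey g then pvUpd cur 0 note else cur) cur
    = if gs.any (fun g => flag == pvKey g) then some (0, note) else cur := by
  induction gs with
  | nil => rintro cur (rfl | rfl) <;> simp
  | cons g gs ih =>
    rintro cur hcur
    rw [List.foldl_cons]
    by_cases h1 : flag == pvKey g
    · have hstep : (if flag == pvKey g then pvUpd cur 0 note else cur) = some (0, note) := by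
        rcases hcur with rfl | rfl <;> simp [h1, pvUpd]
      rw [hstep, ih _ (Or.inr rfl)]
      simp [h1]
    · rw [if_neg (by simp_all), ih _ hcur]
      simp [h1]

-- ===== VERDICT (by name: the statement is the Claim_ definition above) =====
set_option maxHeartbeats 2000000 in
set_option maxRecDepth 8192 in
theorem summarize_confidence_guards_py_spec : Claim_equal_summarize_confidence_guards_py := by
  intro guards _
  unfold Spec_summarize_confidence_guards_py
  by_cases hg : guards = []
  · simp [summarize_confidence_guards_py, summarize_confidence_guards_py_alt, hg]
  · simp only [summarize_confidence_guards_py, summarize_confidence_guards_py_alt, hg,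
      if_false]
    rw [pvContainsA guards "provider_health_weak" (by decide),
      pvContainsA guards "provider_health_caution" (by decide),
      pvContainsA guards "status_watchlist_or_blocked" (by decide),
      pvContainsA guards "data_quality_weak" (by decide),
      pvContainsA guards "data_quality_caution" (by decide),
      pvContainsA guards "explicit_no_trade_reason" (by decide),
      pvContainsA guards "direction_unresolved" (by decide),
      pvContainsA guards "confirmation_conflict_or_no_direction" (by decide),
      pvFold_s0, pvFold_s1, pvFold_s2, pvFold_s3, pvFold_s4, pvFold_s5,
      pvScalarPair _ _ _ _ guards _ (Or.inl rfl),
      pvScalarSingle _ _ guards _ (Or.inl rfl),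
      pvScalarPair _ _ _ _ guards _ (Or.inl rfl),
      pvScalarSingle _ _ guards _ (Or.inl rfl),
      pvScalarSingle _ _ guards _ (Or.inl rfl),
      pvScalarSingle _ _ guards _ (Or.inl rfl)]
    generalize guards.any (fun g => ("provider_health_weak" : String) == pvKey g) = b1
    generalize guards.any (fun g => ("provider_health_caution" : String) == pvKey g) = b2
    generalize guards.any (fun g => ("status_watchlist_or_blocked" : String) == pvKey g) = b3
    generalize guards.any (fun g => ("data_quality_weak" : String) == pvKey g) = b4
    generalize guards.any (fun g => ("data_quality_caution" : String) == pvKey g) = b5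
    generalize guards.any (fun g => ("explicit_no_trade_reason" : String) == pvKey g) = b6
    generalize guards.any (fun g => ("direction_unresolved" : String) == pvKey g) = b7
    generalize guards.any (fun g => ("confirmation_conflict_or_no_direction" : String) == pvKey g) = b8
    revert b1 b2 b3 b4 b5 b6 b7 b8
    decide
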